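-- pv_equiv track=rewrite | github.com/david-borja/cs50w-splitwise | splitwise_clone/utils.py | get_suggested_reimbursements
-- ===== SOURCE A (Python) =====
-- def get_top_debtors(balances):
--     debtors = []
--     sorted_balances = sort_balances(balances)
--     for balance in sorted_balances:
--         person = list(balance.keys())[0]
--         balance_amount = balance[person]
--         if balance_amount < 0:
--             debtors.append(balance)
--         else:
--             return debtors
--
-- def get_top_lenders(balances):
--     lenders = []
--     sorted_balances = sort_balances(balances, "DSC")
--     for balance in sorted_balances:
--         person = list(balance.keys())[0]
--         balance_amount = balance[person]
--         if balance_amount > 0: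
--             lenders.append(balance)
--         else:
--             return lenders
--
-- def get_suggested_reimbursements(balances):
--     top_debtors = get_top_debtors(balances)
--     top_lenders = get_top_lenders(balances)
--
--     reimbursements = {}
--     for debtor in top_debtors:
--         debtor_name = list(debtor.keys())[0]
--         indebted_amount = debtor[debtor_name]
--
--         for index, lender in enumerate(top_lenders):
--             lender_name = list(lender.keys())[0]
--             lended_amount = lender[lender_name]
--             if lended_amount > 0 and abs(indebted_amount) > 0:
--                 reimbursement_amount = (
--                     abs(indebted_amount)
--                     if (abs(indebted_amount) <= lended_amount)
--                     else lended_amount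
--                 )
--                 if debtor_name not in reimbursements:
--                     reimbursements[debtor_name] = {}
--
--                 reimbursements[debtor_name][lender_name] = reimbursement_amount
--                 lended_amount = lended_amount - reimbursement_amount
--                 balances[lender_name] = lended_amount
--                 top_lenders[index][lender_name] = lended_amount
--                 indebted_amount = abs(indebted_amount) - reimbursement_amount
--                 balances[debtor_name] = indebted_amount
--
--     return reimbursements
--
-- def sort_balances(balances, sort="ASC"):
--     reverse = True if sort == "DSC" else False
--     balances_tuple_pairs = balances.items()
--     sorted_data = [
--         {key: value}
--         for key, value in sorted(
--             balances_tuple_pairs, key=lambda item: item[1], reverse=reverse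
--         )
--     ]
--
--     return sorted_data
-- ===== SOURCE B (Python) =====
-- # Two-pointer sweep over the sorted debtor/lender lists instead of A's nested
-- # rescan of all lenders per debtor. Return-value equivalence only: A mutates
-- # the input dict `balances`; B does not.
-- def _settle(d, i, lenders):
--     # pay debt d from lenders[i:], advancing i as lenders drain
--     pays = []
--     while d > 0 and i < len(lenders):
--         ln, la = lenders[i]
--         if d < la:
--             pays.append((ln, d))
--             lenders[i] = (ln, la - d)
--             d = 0
--         else:
--             pays.append((ln, la))
--             d -= la
--             i += 1
--     return pays, i
--
-- def get_suggested_reimbursements(balances):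
--     debtors = [(n, -a) for n, a in sorted(balances.items(), key=lambda kv: kv[1]) if a < 0]
--     lenders = [(n, a) for n, a in sorted(balances.items(), key=lambda kv: kv[1], reverse=True) if a > 0]
--     res = {}
--     i = 0
--     for n, d in debtors:
--         pays, i = _settle(d, i, lenders)
--         if pays:
--             res[n] = dict(pays)
--     return res
-- ===== Notes on version B (the rewrite author's own statement) =====
-- stated objective: faster
-- what changed: A rescans the whole lender list for every debtor (and rebuilds it each pass); B sorts once and does a single two-pointer sweep, each debtor draining lenders from the current pointer on, so every lender is visited O(1) amortised times. Pre_ also excludes association lists with duplicate keys, which cannot arise from A's Python dict argument.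
import Mathlib
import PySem

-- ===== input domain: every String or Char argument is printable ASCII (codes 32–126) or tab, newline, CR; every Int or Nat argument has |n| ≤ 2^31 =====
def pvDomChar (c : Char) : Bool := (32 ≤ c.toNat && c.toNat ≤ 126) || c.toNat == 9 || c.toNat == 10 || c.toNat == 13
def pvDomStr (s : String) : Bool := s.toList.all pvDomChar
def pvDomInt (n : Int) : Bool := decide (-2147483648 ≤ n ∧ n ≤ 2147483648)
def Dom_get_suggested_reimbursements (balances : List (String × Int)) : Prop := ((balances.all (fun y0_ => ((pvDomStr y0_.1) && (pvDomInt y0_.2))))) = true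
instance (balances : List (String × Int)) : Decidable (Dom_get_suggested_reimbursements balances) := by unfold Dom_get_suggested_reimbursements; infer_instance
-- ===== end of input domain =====

-- B replaces A's per-debtor rescan of the whole lender list by a two-pointer sweep over
-- the sorted debtor/lender lists (objective: faster). Return-value equivalence only:
-- Python A mutates its argument dict `balances`; B does not.

-- ===== PORT A =====
-- sort_balances: the returned singleton dicts {key: value} are represented as pairs (key, value)
def pvSortBalances (balances : List (String × Int)) (rev : Bool) : List (String × Int) :=
  PySem.List.sorted balances (fun item => item.2) rev

-- the for-loop of get_top_debtors: falls off the end → Python returns None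
def pvTopDebtorsLoop : List (String × Int) → Option (List (String × Int))
  | [] => none
  | p :: rest =>
      if p.2 < 0 then (pvTopDebtorsLoop rest).map (fun l => p :: l) else some []

def get_top_debtors (balances : List (String × Int)) : Option (List (String × Int)) :=
  pvTopDebtorsLoop (pvSortBalances balances false)

def pvTopLendersLoop : List (String × Int) → Option (List (String × Int))
  | [] => none
  | p :: rest =>
      if p.2 > 0 then (pvTopLendersLoop rest).map (fun l => p :: l) else some []

def get_top_lenders (balances : List (String × Int)) : Option (List (String × Int)) :=
  pvTopLendersLoop (pvSortBalances balances true)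

-- one iteration of the inner `for index, lender in enumerate(top_lenders)` loop;
-- state = (indebted_amount, reimbursements, balances, the updated prefix of top_lenders)
def pvStepA (dn : String)
    (st : Int × PySem.Dict String (PySem.Dict String Int) × PySem.Dict String Int × List (String × Int))
    (l : String × Int) :
    Int × PySem.Dict String (PySem.Dict String Int) × PySem.Dict String Int × List (String × Int) :=
  match st, l with
  | (ind, r, b, proc), (ln, la) =>
    if 0 < la ∧ 0 < |ind| then
      let ra := if |ind| ≤ la then |ind| else la
      -- `if debtor_name not in reimbursements: … = {}` then `…[lender_name] = ra`
      let r' := r.insert dn ((r.getD dn PySem.Dict.empty).insert ln ra)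
      let la' := la - ra
      let b' := b.insert ln la'
      let proc' := proc ++ [(ln, la')]      -- top_lenders[index][lender_name] = la'
      let ind' := |ind| - ra
      let b'' := b'.insert dn ind'
      (ind', r', b'', proc')
    else (ind, r, b, proc ++ [(ln, la)])

-- one iteration of the outer `for debtor in top_debtors` loop
def pvOuterA
    (st : PySem.Dict String (PySem.Dict String Int) × PySem.Dict String Int × List (String × Int))
    (debtor : String × Int) :
    PySem.Dict String (PySem.Dict String Int) × PySem.Dict String Int × List (String × Int) :=
  match st with
  | (r, b, lenders) =>
    let fin := lenders.foldl (pvStepA debtor.1) (debtor.2, r, b, [])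
    (fin.2.1, fin.2.2.1, fin.2.2.2)

def get_suggested_reimbursements (balances : List (String × Int)) : List (String × List (String × Int)) :=
  match get_top_debtors balances, get_top_lenders balances with
  | some top_debtors, some top_lenders =>
      let fin := top_debtors.foldl pvOuterA
        ((PySem.Dict.empty : PySem.Dict String (PySem.Dict String Int)), PySem.Dict.mk balances, top_lenders)
      fin.1.items.map (fun p => (p.1, p.2.items))
  | _, _ => []   -- Python raises TypeError here (iterating None); excluded by Pre_

-- ===== PORT B =====
-- _settle: pay debt d from the front of `lenders`; returns (pays, remaining lenders)
def pvSettleB : Int → List (String × Int) → List (String × Int) × List (String × Int)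
  | _, [] => ([], [])
  | d, (ln, la) :: rest =>
      if d ≤ 0 then ([], (ln, la) :: rest)
      else if d < la then ([(ln, d)], (ln, la - d) :: rest)
      else
        let res := pvSettleB (d - la) rest
        ((ln, la) :: res.1, res.2)

-- the `for n, d in debtors` loop, threading the remaining lenders
def pvGoB : List (String × Int) → List (String × Int) → List (String × List (String × Int))
  | [], _ => []
  | (n, d) :: ds, ls =>
      let res := pvSettleB d ls
      if res.1 = [] then pvGoB ds res.2 else (n, res.1) :: pvGoB ds res.2

def get_suggested_reimbursements_alt (balances : List (String × Int)) : List (String × List (String × Int)) :=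
  let debtors := ((PySem.List.sorted balances (fun kv => kv.2) false).filter
      (fun p => p.2 < 0)).map (fun p => (p.1, -p.2))
  let lenders := (PySem.List.sorted balances (fun kv => kv.2) true).filter (fun p => 0 < p.2)
  pvGoB debtors lenders

-- ===== PRECONDITION & SPEC =====
-- A raises TypeError (get_top_debtors / get_top_lenders fall off their loop and return None)
-- unless some balance is ≥ 0 and some balance is ≤ 0; distinct keys because the Python
-- argument is a dict, which cannot hold duplicate keys.
def Pre_get_suggested_reimbursements (balances : List (String × Int)) : Prop :=
  (∃ p ∈ balances, 0 ≤ p.2) ∧ (∃ p ∈ balances, p.2 ≤ 0) ∧ (balances.map Prod.fst).Nodup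
instance (balances : List (String × Int)) : Decidable (Pre_get_suggested_reimbursements balances) := by
  unfold Pre_get_suggested_reimbursements; infer_instance

def pvWitness_get_suggested_reimbursements : (List (String × Int)) := [("a", 3), ("b", -2)]

def Spec_get_suggested_reimbursements (balances : List (String × Int)) (out : List (String × List (String × Int))) : Prop := out = get_suggested_reimbursements_alt balances
instance (balances : List (String × Int)) (out : List (String × List (String × Int))) : Decidable (Spec_get_suggested_reimbursements balances out) := by unfold Spec_get_suggested_reimbursements; infer_instance

-- ===== CLAIM (what is proved, stated in full; the proofs are below) =====
def Claim_equal_get_suggested_reimbursements : Prop := ∀ (balances : List (String × Int)), Dom_get_suggested_reimbursements balances → Pre_get_suggested_reimbursements balances → Spec_get_suggested_reimbursements balances (get_suggested_reimbursements balances)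

-- ===== LEMMAS AND PROOFS =====

-- the inner dict built by recording the pairs `ps` one assignment at a time
def pvDictOf (ps : List (String × Int)) (w : PySem.Dict String Int) : PySem.Dict String Int :=
  ps.foldl (fun w q => w.insert q.1 q.2) w

theorem pvStepA_skip (dn : String) (ind : Int) (r : PySem.Dict String (PySem.Dict String Int))
    (b : PySem.Dict String Int) (proc : List (String × Int)) (ln : String) (la : Int)
    (h : ¬ (0 < la ∧ 0 < |ind|)) :
    pvStepA dn (ind, r, b, proc) (ln, la) = (ind, r, b, proc ++ [(ln, la)]) := by
  simp only [pvStepA, if_neg h]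

theorem pvStepA_act (dn : String) (ind : Int) (r : PySem.Dict String (PySem.Dict String Int))
    (b : PySem.Dict String Int) (proc : List (String × Int)) (ln : String) (la : Int)
    (h : 0 < la ∧ 0 < |ind|) :
    pvStepA dn (ind, r, b, proc) (ln, la) =
      (|ind| - (if |ind| ≤ la then |ind| else la),
       r.insert dn ((r.getD dn PySem.Dict.empty).insert ln (if |ind| ≤ la then |ind| else la)),
       (b.insert ln (la - (if |ind| ≤ la then |ind| else la))).insert dn
         (|ind| - (if |ind| ≤ la then |ind| else la)),
       proc ++ [(ln, la - (if |ind| ≤ la then |ind| else la))]) := by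
  simp only [pvStepA, if_pos h]

theorem pvSettleB_nonpos {d : Int} (hd : d ≤ 0) (L : List (String × Int)) :
    pvSettleB d L = ([], L) := by
  cases L with
  | nil => simp [pvSettleB]
  | cons p rest => obtain ⟨ln, la⟩ := p; simp [pvSettleB, hd]

theorem pvTopD_eq (s : List (String × Int))
    (hs : s.Pairwise (fun a b => a.2 ≤ b.2)) (hex : ∃ p ∈ s, 0 ≤ p.2) :
    pvTopDebtorsLoop s = some (s.filter (fun p => p.2 < 0)) := by
  induction s with
  | nil => simp at hex
  | cons p rest ih =>
    rcases List.pairwise_cons.mp hs with ⟨h1, h2⟩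
    by_cases hp : p.2 < 0
    · obtain ⟨q, hq, hq0⟩ := hex
      rcases List.mem_cons.mp hq with rfl | hq'
      · omega
      · simp only [pvTopDebtorsLoop, if_pos hp, ih h2 ⟨q, hq', hq0⟩, List.filter_cons,
          Option.map_some]
        simp [hp]
    · have hrest : rest.filter (fun p => p.2 < 0) = [] := by
        rw [List.filter_eq_nil_iff]
        intro q hq
        have := h1 q hq
        simp only [decide_eq_true_eq]
        omega
      simp only [pvTopDebtorsLoop, if_neg hp, List.filter_cons]
      simp [hp, hrest]

theorem pvTopL_eq (s : List (String × Int))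
    (hs : s.Pairwise (fun a b => b.2 ≤ a.2)) (hex : ∃ p ∈ s, p.2 ≤ 0) :
    pvTopLendersLoop s = some (s.filter (fun p => 0 < p.2)) := by
  induction s with
  | nil => simp at hex
  | cons p rest ih =>
    rcases List.pairwise_cons.mp hs with ⟨h1, h2⟩
    by_cases hp : p.2 > 0
    · obtain ⟨q, hq, hq0⟩ := hex
      rcases List.mem_cons.mp hq with rfl | hq'
      · omega
      · simp only [pvTopLendersLoop, if_pos hp, ih h2 ⟨q, hq', hq0⟩, List.filter_cons,
          Option.map_some]
        simp [hp]
    · have hrest : rest.filter (fun p => 0 < p.2) = [] := by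
        rw [List.filter_eq_nil_iff]
        intro q hq
        have := h1 q hq
        simp only [decide_eq_true_eq]
        omega
      simp only [pvTopLendersLoop, if_neg hp, List.filter_cons]
      simp [hp, hrest]

theorem pvSettle_pos (d : Int) (L : List (String × Int)) (h : ∀ p ∈ L, 0 < p.2) :
    ∀ p ∈ (pvSettleB d L).2, 0 < p.2 := by
  induction L generalizing d with
  | nil => simp [pvSettleB]
  | cons hd rest ih =>
    obtain ⟨ln, la⟩ := hd
    have hrest : ∀ p ∈ rest, 0 < p.2 := fun p hp => h p (List.mem_cons_of_mem _ hp)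
    simp only [pvSettleB]
    split_ifs with h1 h2
    · exact h
    · intro p hp
      rcases List.mem_cons.mp hp with rfl | hp'
      · simpa using h2
      · exact hrest p hp'
    · exact ih (d - la) hrest

theorem pvSettle_fst_sublist (d : Int) (L : List (String × Int)) :
    ((pvSettleB d L).1.map Prod.fst).Sublist (L.map Prod.fst) ∧
    ((pvSettleB d L).2.map Prod.fst).Sublist (L.map Prod.fst) := by
  induction L generalizing d with
  | nil => simp [pvSettleB]
  | cons hd rest ih =>
    obtain ⟨ln, la⟩ := hd
    simp only [pvSettleB]
    split_ifs with h1 h2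
    · simp
    · refine ⟨?_, ?_⟩ <;> simp
    · obtain ⟨ih1, ih2⟩ := ih (d - la)
      constructor
      · simpa using List.Sublist.cons₂ ln ih1
      · simpa using ih2.cons ln

theorem pvSkipZ (dn : String) (Z : List (String × Int)) (h : ∀ z ∈ Z, z.2 ≤ 0) :
    ∀ ind r b proc, Z.foldl (pvStepA dn) (ind, r, b, proc) = (ind, r, b, proc ++ Z) := by
  induction Z with
  | nil => simp
  | cons z Z ih =>
    intro ind r b proc
    obtain ⟨ln, la⟩ := z
    have hla : ¬ (0 < la) := by have := h (ln, la) (List.mem_cons_self); simpa using not_lt.mpr this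
    have hz : ∀ z ∈ Z, z.2 ≤ 0 := fun z hz => h z (List.mem_cons_of_mem _ hz)
    rw [List.foldl_cons, pvStepA_skip dn ind r b proc ln la (fun hc => hla hc.1), ih hz]
    simp

theorem pvSkip0 (dn : String) (L : List (String × Int)) :
    ∀ r b proc, L.foldl (pvStepA dn) (0, r, b, proc) = (0, r, b, proc ++ L) := by
  induction L with
  | nil => simp
  | cons z L ih =>
    intro r b proc
    obtain ⟨ln, la⟩ := z
    rw [List.foldl_cons, pvStepA_skip dn 0 r b proc ln la (by simp), ih]
    simp

theorem pvInnerA_spec (dn : String) (L : List (String × Int)) (hL : ∀ p ∈ L, 0 < p.2) :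
    ∀ ind r b proc, ∃ ind' b' Z',
      L.foldl (pvStepA dn) (ind, r, b, proc) =
        (ind',
         (if (pvSettleB |ind| L).1 = [] then r
          else r.insert dn (pvDictOf (pvSettleB |ind| L).1 (r.getD dn PySem.Dict.empty))),
         b',
         proc ++ Z' ++ (pvSettleB |ind| L).2) ∧ (∀ z ∈ Z', z.2 ≤ 0) := by
  induction L with
  | nil =>
    intro ind r b proc
    exact ⟨ind, b, [], by simp [pvSettleB], by simp⟩
  | cons hd rest ih =>
    obtain ⟨ln, la⟩ := hd
    have hla : 0 < la := by simpa using hL (ln, la) List.mem_cons_self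
    have hrest : ∀ p ∈ rest, 0 < p.2 := fun p hp => hL p (List.mem_cons_of_mem _ hp)
    intro ind r b proc
    by_cases h0 : ind = 0
    · subst h0
      refine ⟨0, b, [], ?_, by simp⟩
      rw [List.foldl_cons, pvStepA_skip dn 0 r b proc ln la (by simp), pvSkip0]
      simp [pvSettleB]
    · have habs : 0 < |ind| := abs_pos.mpr h0
      by_cases hle : |ind| ≤ la
      · rw [List.foldl_cons, pvStepA_act dn ind r b proc ln la ⟨hla, habs⟩]
        simp only [if_pos hle, sub_self]
        rw [pvSkip0]
        by_cases hlt : |ind| < la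
        · -- partial payment: lender keeps la - |ind| > 0
          refine ⟨0, (b.insert ln (la - |ind|)).insert dn 0, [], ?_, by simp⟩
          have hs : pvSettleB |ind| ((ln, la) :: rest) = ([(ln, |ind|)], (ln, la - |ind|) :: rest) := by
            simp only [pvSettleB, if_neg (by omega : ¬ |ind| ≤ 0), if_pos hlt]
          rw [hs]
          simp [pvDictOf]
        · -- exact payment: |ind| = la, lender zeroed
          have heq : la = |ind| := by omega
          have hs : pvSettleB |ind| ((ln, la) :: rest) = ([(ln, la)], rest) := by
            simp only [pvSettleB, if_neg (by omega : ¬ |ind| ≤ 0), if_neg hlt]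
            rw [pvSettleB_nonpos (by omega) rest]
          refine ⟨0, (b.insert ln (la - |ind|)).insert dn 0, [(ln, la - |ind|)], ?_, ?_⟩
          · rw [hs]
            simp [pvDictOf, heq]
          · intro z hz
            simp only [List.mem_singleton] at hz
            subst hz
            simp [heq]
      · -- la < |ind|: lender fully consumed, debt continues
        rw [List.foldl_cons, pvStepA_act dn ind r b proc ln la ⟨hla, habs⟩]
        simp only [if_neg hle]
        obtain ⟨ind', b', Z'', hfold, hZ''⟩ := ih hrest (|ind| - la)
          (r.insert dn ((r.getD dn PySem.Dict.empty).insert ln la))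
          ((b.insert ln (la - la)).insert dn (|ind| - la)) (proc ++ [(ln, la - la)])
        have habs2 : |(|ind| - la)| = |ind| - la := abs_of_pos (by omega)
        rw [habs2] at hfold
        have hs : pvSettleB |ind| ((ln, la) :: rest) =
            ((ln, la) :: (pvSettleB (|ind| - la) rest).1, (pvSettleB (|ind| - la) rest).2) := by
          simp only [pvSettleB, if_neg (by omega : ¬ |ind| ≤ 0), if_neg (by omega : ¬ |ind| < la)]
        rw [hfold]
        refine ⟨ind', b', (ln, la - la) :: Z'', ?_, ?_⟩
        · rw [hs]
          have hr : (if (ln, la) :: (pvSettleB (|ind| - la) rest).1 = [] then r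
              else r.insert dn (pvDictOf ((ln, la) :: (pvSettleB (|ind| - la) rest).1)
                (r.getD dn PySem.Dict.empty))) =
              (if (pvSettleB (|ind| - la) rest).1 = []
               then r.insert dn ((r.getD dn PySem.Dict.empty).insert ln la)
               else (r.insert dn ((r.getD dn PySem.Dict.empty).insert ln la)).insert dn
                 (pvDictOf (pvSettleB (|ind| - la) rest).1
                   ((r.insert dn ((r.getD dn PySem.Dict.empty).insert ln la)).getD dn
                     PySem.Dict.empty))) := by
            by_cases hps : (pvSettleB (|ind| - la) rest).1 = []
            · simp [hps, pvDictOf]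
            · rw [if_neg (by simp), if_neg hps, PySem.Dict.getD_insert_self,
                PySem.Dict.insert_insert_self]
              simp [pvDictOf]
          rw [hr]
          simp [List.append_assoc]
        · intro z hz
          rcases List.mem_cons.mp hz with rfl | hz'
          · simp
          · exact hZ'' z hz'

theorem pvDictOf_items (ps : List (String × Int)) (hnd : (ps.map Prod.fst).Nodup) :
    (pvDictOf ps PySem.Dict.empty).items = ps := by
  unfold pvDictOf
  have h := PySem.Dict.items_foldl_insert_fresh (l := ps)
    (d := (PySem.Dict.empty : PySem.Dict String Int)) (k := Prod.fst) (v := Prod.snd)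
    (fun a _ => PySem.Dict.contains_empty _) hnd
  simpa using h

theorem pvGoB_cons (n : String) (d : Int) (ds ls : List (String × Int)) :
    pvGoB ((n, d) :: ds) ls =
      if (pvSettleB d ls).1 = [] then pvGoB ds (pvSettleB d ls).2
      else (n, (pvSettleB d ls).1) :: pvGoB ds (pvSettleB d ls).2 := rfl

theorem pvOuterA_spec (ds : List (String × Int)) :
    ∀ (Z L : List (String × Int)) (r : PySem.Dict String (PySem.Dict String Int)) b,
    (∀ z ∈ Z, z.2 ≤ 0) → (∀ p ∈ L, 0 < p.2) → (L.map Prod.fst).Nodup →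
    (∀ q ∈ ds, q.2 < 0) → (ds.map Prod.fst).Nodup →
    (∀ n ∈ ds.map Prod.fst, r.contains n = false) → r.keys.Nodup →
    (ds.foldl pvOuterA (r, b, Z ++ L)).1.items.map (fun p => (p.1, p.2.items))
      = r.items.map (fun p => (p.1, p.2.items)) ++ pvGoB (ds.map (fun q => (q.1, -q.2))) L := by
  induction ds with
  | nil => intro Z L r b _ _ _ _ _ _ _; simp [pvGoB]
  | cons q ds ih =>
    obtain ⟨dn, d0⟩ := q
    intro Z L r b hZ hL hLnd hds hdsnd hcont hknd
    have hd0 : d0 < 0 := by simpa using hds (dn, d0) List.mem_cons_self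
    have habs : |d0| = -d0 := abs_of_neg hd0
    have hcdn : r.contains dn = false := hcont dn (by simp)
    obtain ⟨ind', b', Z', hfold, hZ'⟩ := pvInnerA_spec dn L hL d0 r b Z
    rw [habs] at hfold
    have hgetD : r.getD dn PySem.Dict.empty = PySem.Dict.empty :=
      PySem.Dict.getD_of_not_contains _ _ hcdn
    rw [hgetD] at hfold
    have houter : pvOuterA (r, b, Z ++ L) (dn, d0) =
        ((if (pvSettleB (-d0) L).1 = [] then r
          else r.insert dn (pvDictOf (pvSettleB (-d0) L).1 PySem.Dict.empty)),
         b', (Z ++ Z') ++ (pvSettleB (-d0) L).2) := by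
      show (let fin := (Z ++ L).foldl (pvStepA dn) (d0, r, b, []);
        (fin.2.1, fin.2.2.1, fin.2.2.2)) = _
      rw [List.foldl_append, pvSkipZ dn Z hZ, List.nil_append, hfold]
    rw [List.foldl_cons, houter]
    -- facts about the remaining lenders
    have hL2 : ∀ p ∈ (pvSettleB (-d0) L).2, 0 < p.2 := pvSettle_pos (-d0) L hL
    have hLnd2 : ((pvSettleB (-d0) L).2.map Prod.fst).Nodup :=
      List.Nodup.sublist (pvSettle_fst_sublist (-d0) L).2 hLnd
    have hZ2 : ∀ z ∈ Z ++ Z', z.2 ≤ 0 := by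
      intro z hz
      rcases List.mem_append.mp hz with h | h
      · exact hZ z h
      · exact hZ' z h
    have hds2 : ∀ p ∈ ds, p.2 < 0 := fun p hp => hds p (List.mem_cons_of_mem _ hp)
    have hdsnd2 : (ds.map Prod.fst).Nodup := (List.nodup_cons.mp (by simpa using hdsnd)).2
    have hdn_not : dn ∉ ds.map Prod.fst := (List.nodup_cons.mp (by simpa using hdsnd)).1
    by_cases hps : (pvSettleB (-d0) L).1 = []
    · rw [if_pos hps]
      rw [ih (Z ++ Z') (pvSettleB (-d0) L).2 r b' hZ2 hL2 hLnd2 hds2 hdsnd2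
        (fun n hn => hcont n (by simpa using Or.inr hn)) hknd]
      rw [List.map_cons, pvGoB_cons, if_pos hps]
    · rw [if_neg hps]
      have hpsnd : ((pvSettleB (-d0) L).1.map Prod.fst).Nodup :=
        List.Nodup.sublist (pvSettle_fst_sublist (-d0) L).1 hLnd
      set R := r.insert dn (pvDictOf (pvSettleB (-d0) L).1 PySem.Dict.empty) with hR
      have hdn_nkeys : dn ∉ r.keys := by
        intro hmem
        rw [← PySem.Dict.contains_iff_mem_keys] at hmem
        simp [hcdn] at hmem
      have hcont2 : ∀ n ∈ ds.map Prod.fst, R.contains n = false := by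
        intro n hn
        rw [hR, PySem.Dict.contains_insert]
        have hne : n ≠ dn := fun h => hdn_not (h ▸ hn)
        simp [hne, hcont n (by simpa using Or.inr hn)]
      have hknd2 : R.keys.Nodup := by
        rw [hR, PySem.Dict.keys_insert_of_not_contains _ _ hcdn]
        simp only [List.nodup_append, List.nodup_singleton, true_and]
        refine ⟨hknd, ?_⟩
        intro a ha c hc
        simp only [List.mem_singleton] at hc
        subst hc
        intro h
        rw [h] at ha
        exact hdn_nkeys ha
      rw [ih (Z ++ Z') (pvSettleB (-d0) L).2 R b' hZ2 hL2 hLnd2 hds2 hdsnd2 hcont2 hknd2]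
      have hitems : R.items = r.items ++ [(dn, pvDictOf (pvSettleB (-d0) L).1 PySem.Dict.empty)] :=
        PySem.Dict.items_insert_of_not_contains _ _ hcdn
      rw [hitems]
      rw [List.map_cons, pvGoB_cons, if_neg hps]
      simp only [List.map_append, List.map_cons, List.map_nil]
      rw [pvDictOf_items _ hpsnd]
      simp


-- ===== VERDICT (by name: the statement is the Claim_ definition above) =====
theorem get_suggested_reimbursements_spec : Claim_equal_get_suggested_reimbursements := by
  intro balances _ hpre
  obtain ⟨⟨p, hp, hp0⟩, ⟨q, hq, hq0⟩, hnd⟩ := hpre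
  unfold Spec_get_suggested_reimbursements
  have htd : get_top_debtors balances =
      some ((PySem.List.sorted balances (fun item => item.2) false).filter (fun p => p.2 < 0)) := by
    unfold get_top_debtors pvSortBalances
    exact pvTopD_eq _ (PySem.List.sorted_pairwise balances (fun item => item.2))
      ⟨p, (PySem.List.mem_sorted balances _ false p).mpr hp, hp0⟩
  have htl : get_top_lenders balances =
      some ((PySem.List.sorted balances (fun item => item.2) true).filter (fun p => 0 < p.2)) := by
    unfold get_top_lenders pvSortBalances
    exact pvTopL_eq _ (PySem.List.sorted_pairwise_rev balances (fun item => item.2))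
      ⟨q, (PySem.List.mem_sorted balances _ true q).mpr hq, hq0⟩
  have hmain : get_suggested_reimbursements balances =
      (((PySem.List.sorted balances (fun item => item.2) false).filter
          (fun p => p.2 < 0)).foldl pvOuterA
        ((PySem.Dict.empty : PySem.Dict String (PySem.Dict String Int)), PySem.Dict.mk balances,
         (PySem.List.sorted balances (fun item => item.2) true).filter
           (fun p => 0 < p.2))).1.items.map (fun p => (p.1, p.2.items)) := by
    unfold get_suggested_reimbursements
    rw [htd, htl]
  rw [hmain]
  have hdesc_nd : ((PySem.List.sorted balances (fun item => item.2) true).map Prod.fst).Nodup :=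
    (List.Perm.nodup_iff ((PySem.List.sorted_perm balances (fun item => item.2) true).map Prod.fst)).mpr hnd
  have hasc_nd : ((PySem.List.sorted balances (fun item => item.2) false).map Prod.fst).Nodup :=
    (List.Perm.nodup_iff ((PySem.List.sorted_perm balances (fun item => item.2) false).map Prod.fst)).mpr hnd
  have hls : ∀ x ∈ (PySem.List.sorted balances (fun item => item.2) true).filter
      (fun p => 0 < p.2), 0 < x.2 := by
    intro x hx
    simpa using List.of_mem_filter hx
  have hlsnd : (((PySem.List.sorted balances (fun item => item.2) true).filter
      (fun p => 0 < p.2)).map Prod.fst).Nodup :=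
    List.Nodup.sublist (List.Sublist.map Prod.fst List.filter_sublist) hdesc_nd
  have hds : ∀ x ∈ (PySem.List.sorted balances (fun item => item.2) false).filter
      (fun p => p.2 < 0), x.2 < 0 := by
    intro x hx
    simpa using List.of_mem_filter hx
  have hdsnd : (((PySem.List.sorted balances (fun item => item.2) false).filter
      (fun p => p.2 < 0)).map Prod.fst).Nodup :=
    List.Nodup.sublist (List.Sublist.map Prod.fst List.filter_sublist) hasc_nd
  have hout := pvOuterA_spec
    ((PySem.List.sorted balances (fun item => item.2) false).filter (fun p => p.2 < 0))
    []
    ((PySem.List.sorted balances (fun item => item.2) true).filter (fun p => 0 < p.2))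
    (PySem.Dict.empty : PySem.Dict String (PySem.Dict String Int))
    (PySem.Dict.mk balances)
    (by simp) hls hlsnd hds hdsnd
    (fun n _ => PySem.Dict.contains_empty n)
    (PySem.Dict.nodup_keys_empty)
  rw [List.nil_append] at hout
  rw [hout]
  unfold get_suggested_reimbursements_alt
  simp
  rfl
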